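-- pv_equiv track=rewrite | github.com/ThomSullivan/50DaysOfPython | Days/day45.py | analyse_string
-- ===== SOURCE A (Python) =====
-- import string
--
-- str = 'Python has a string format operator %. This functions analogously to printf format strings in C, e.g. "spam=%s eggs=%d" % ("blah", 2) evaluates to "spam=blah eggs=2". Source Wikipedia'
--
-- def analyse_string(str):
--     symbols = {x for x in string.punctuation}
--     results = {'special characters': 0, 'words':0, 'total characters':0 }
--     for char in str:
--         if char in symbols:
--             results['special characters'] += 1
--         if char != ' ':
--             results['total characters'] += 1
--     results['words'] = len([ x for x in str.split() if len([y for y in x if y in symbols]) == 0])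
--     return results
-- ===== SOURCE B (Python) =====
-- import string
--
-- _PUNCT = frozenset(string.punctuation)
--
-- def analyse_string(str):
--     special = 0
--     total = 0
--     words = 0
--     in_word = False
--     clean = True
--     for ch in str:
--         if ch != ' ':
--             total += 1
--         if ch.isspace():
--             if in_word and clean:
--                 words += 1
--             in_word = False
--             clean = True
--         else:
--             in_word = True
--             if ch in _PUNCT:
--                 special += 1
--                 clean = False
--     if in_word and clean:
--         words += 1
--     return {'special characters': special, 'words': words, 'total characters': total}
-- ===== Notes on version B (the rewrite author's own statement) =====
-- stated objective: alternative
-- what changed: Replaces A's two traversals (a char loop for the counters plus a separate split()-based scan that re-filters every word's characters) with a single streaming pass that maintains special/total counters together with in_word/current_word_clean flags, counting clean words at whitespace boundaries (measured ~1.4-1.5x, below the confirmation threshold, so not claimed as faster).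
import Mathlib
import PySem

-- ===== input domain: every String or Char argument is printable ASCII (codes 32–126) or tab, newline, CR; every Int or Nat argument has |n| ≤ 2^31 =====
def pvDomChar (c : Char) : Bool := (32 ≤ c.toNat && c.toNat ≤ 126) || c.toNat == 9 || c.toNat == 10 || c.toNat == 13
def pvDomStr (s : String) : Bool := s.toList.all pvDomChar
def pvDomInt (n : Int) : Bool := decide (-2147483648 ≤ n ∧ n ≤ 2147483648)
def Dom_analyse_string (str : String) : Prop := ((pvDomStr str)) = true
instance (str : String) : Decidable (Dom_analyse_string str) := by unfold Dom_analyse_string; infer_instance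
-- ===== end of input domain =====

-- B replaces A's two passes (a char loop for the counters plus a separate split()-based word scan)
-- by ONE streaming loop that also tracks word state (in_word / current-word-clean); same result.

-- string.punctuation
def pvPunct : List Char := "!\"#$%&'()*+,-./:;<=>?@[\\]^_`{|}~".toList

-- ===== PORT A =====
-- the body of A's 'for char in str' loop
def pvAStep (r : PySem.Dict String Int) (char : Char) : PySem.Dict String Int :=
  let r := if (PySem.Set.ofList pvPunct).contains char then r.modify "special characters" 0 (· + 1) else r
  if char ≠ ' ' then r.modify "total characters" 0 (· + 1) else r

def analyse_string (str : String) : List (String × Int) :=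
  let symbols : PySem.Set Char := PySem.Set.ofList pvPunct
  let results : PySem.Dict String Int :=
    PySem.Dict.ofList [("special characters", 0), ("words", 0), ("total characters", 0)]
  let results := str.toList.foldl pvAStep results
  let results := results.insert "words"
    (((PySem.Str.split₀ str).filter
        (fun x => (x.toList.filter (fun y => symbols.contains y)).length == 0)).length : Int)
  results.items

-- ===== PORT B =====
-- state: (special, total, words, in_word, current_word_clean); the body of B's 'for ch in str' loop
def pvBStep (st : Int × Int × Int × Bool × Bool) (ch : Char) : Int × Int × Int × Bool × Bool :=
  match st with
  | (special, total, words, in_word, clean) =>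
    let total := if ch ≠ ' ' then total + 1 else total
    if PySem.Chars.isspace ch then
      (special, total, if in_word && clean then words + 1 else words, false, true)
    else
      if pvPunct.contains ch then (special + 1, total, words, true, false)
      else (special, total, words, true, clean)

def analyse_string_alt (str : String) : List (String × Int) :=
  match str.toList.foldl pvBStep ((0 : Int), (0 : Int), (0 : Int), false, true) with
  | (special, total, words, in_word, clean) =>
    [("special characters", special),
     ("words", if in_word && clean then words + 1 else words),
     ("total characters", total)]

-- ===== PRECONDITION & SPEC =====
def Spec_analyse_string (str : String) (out : List (String × Int)) : Prop := out = analyse_string_alt str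
instance (str : String) (out : List (String × Int)) : Decidable (Spec_analyse_string str out) := by unfold Spec_analyse_string; infer_instance

-- ===== CLAIM (what is proved, stated in full; the proofs are below) =====
def Claim_equal_analyse_string : Prop := ∀ (str : String), Dom_analyse_string str → Spec_analyse_string str (analyse_string str)

-- ===== LEMMAS AND PROOFS =====

-- A's word count, streamed: words completed while reading cs, having started inside (iw) a
-- so-far-clean (cl) word; the common description both ports are reduced to
def pvStreamW : List Char → Bool → Bool → Int
  | [], iw, cl => if iw && cl then 1 else 0
  | c :: rest, iw, cl =>
      if PySem.Chars.isspace c then (if iw && cl then 1 else 0) + pvStreamW rest false true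
      else pvStreamW rest true (cl && !pvPunct.contains c)

def pvCleanW (w : List Char) : Bool := w.all (fun y => !pvPunct.contains y)

set_option maxRecDepth 4096 in
theorem pvOfList_punct : PySem.Set.ofList pvPunct = pvPunct :=
  PySem.Set.ofList_eq_self_of_nodup (xs := pvPunct) (by decide)

theorem pvPunct_all_not_space : pvPunct.all (fun x => !PySem.Chars.isspace x) = true := by rfl

theorem pvPunct_not_space : ∀ x ∈ pvPunct, PySem.Chars.isspace x = false := by
  have h := pvPunct_all_not_space
  rw [List.all_eq_true] at h
  intro x hx
  simpa using h x hx

theorem pvPunct_contains_of_space (c : Char) (hs : PySem.Chars.isspace c = true) :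
    pvPunct.contains c = false := by
  cases h : pvPunct.contains c with
  | false => rfl
  | true => rw [pvPunct_not_space c (by simpa using h)] at hs; exact absurd hs (by simp)

theorem pvClean_eq (w : List Char) :
    ((w.filter (fun y => pvPunct.contains y)).length == 0) = pvCleanW w := by
  rw [Bool.eq_iff_iff]
  simp [pvCleanW, List.length_eq_zero_iff, List.filter_eq_nil_iff, List.all_eq_true]

theorem pvCleanW_reverse (w : List Char) : pvCleanW w.reverse = pvCleanW w := by
  simp [pvCleanW, List.all_reverse]

theorem pvGo_clean (cs : List Char) : ∀ (cur : List Char) (acc : List (List Char)),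
    ((PySem.Chars.split₀.go cs cur acc).countP pvCleanW : Int)
      = acc.countP pvCleanW + pvStreamW cs (!cur.isEmpty) (pvCleanW cur) := by
  induction cs with
  | nil =>
      intro cur acc
      unfold PySem.Chars.split₀.go pvStreamW
      cases cur with
      | nil => simp
      | cons c rest =>
          simp only [List.isEmpty_cons, if_neg (by simp : ¬ (false = true)),
            Bool.not_false, Bool.true_and]
          rw [List.countP_reverse, List.countP_cons, pvCleanW_reverse]
          split_ifs <;> push_cast <;> ring
  | cons c rest ih =>
      intro cur acc
      unfold PySem.Chars.split₀.go pvStreamW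
      by_cases hs : PySem.Chars.isspace c = true
      · rw [if_pos hs, if_pos hs]
        cases cur with
        | nil => simpa using ih [] acc
        | cons d ds =>
            rw [if_neg (by simp)]
            rw [ih [] ((d :: ds).reverse :: acc)]
            rw [List.countP_cons, pvCleanW_reverse]
            simp only [List.isEmpty_cons, Bool.not_false, Bool.true_and, List.isEmpty_nil,
              Bool.not_true]
            have h0 : pvCleanW [] = true := rfl
            rw [h0]
            split_ifs <;> push_cast <;> ring
      · rw [if_neg hs, if_neg hs]
        rw [ih (c :: cur) acc]
        simp only [List.isEmpty_cons, Bool.not_false]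
        congr 2
        simp only [pvCleanW, List.all_cons]
        exact Bool.and_comm _ _

theorem pvBLoop_spec (cs : List Char) : ∀ (sp tot w : Int) (iw cl : Bool),
    ((cs.foldl pvBStep (sp, tot, w, iw, cl)).1
        = sp + (cs.countP (fun c => pvPunct.contains c) : Int))
    ∧ ((cs.foldl pvBStep (sp, tot, w, iw, cl)).2.1
        = tot + (cs.countP (fun c => decide (c ≠ ' ')) : Int))
    ∧ ((if (cs.foldl pvBStep (sp, tot, w, iw, cl)).2.2.2.1
            && (cs.foldl pvBStep (sp, tot, w, iw, cl)).2.2.2.2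
        then (cs.foldl pvBStep (sp, tot, w, iw, cl)).2.2.1 + 1
        else (cs.foldl pvBStep (sp, tot, w, iw, cl)).2.2.1)
        = w + pvStreamW cs iw cl) := by
  induction cs with
  | nil =>
      intro sp tot w iw cl
      unfold pvStreamW
      refine ⟨by simp, by simp, ?_⟩
      cases iw <;> cases cl <;> simp
  | cons c rest ih =>
      intro sp tot w iw cl
      simp only [List.foldl_cons, List.countP_cons]
      unfold pvStreamW
      by_cases hs : PySem.Chars.isspace c = true
      · have hp : pvPunct.contains c = false := pvPunct_contains_of_space c hs
        have hp' : c ∉ pvPunct := by simpa using hp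
        have hstep : pvBStep (sp, tot, w, iw, cl) c
            = (sp, (if c ≠ ' ' then tot + 1 else tot), (if iw && cl then w + 1 else w), false, true) := by
          simp [pvBStep, hs]
        rw [hstep, if_pos hs]
        obtain ⟨ih1, ih2, ih3⟩ :=
          ih sp (if c ≠ ' ' then tot + 1 else tot) (if iw && cl then w + 1 else w) false true
        refine ⟨?_, ?_, ?_⟩
        · rw [ih1]; simp [hp']
        · rw [ih2]
          by_cases hc : c = ' ' <;> simp [hc]
          all_goals try ring
        · rw [ih3]
          cases iw <;> cases cl <;> simp
          all_goals try ring
      · have hcs : c ≠ ' ' := by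
          intro h; subst h; exact hs (by decide)
        by_cases hp : c ∈ pvPunct
        · have hstep : pvBStep (sp, tot, w, iw, cl) c
              = (sp + 1, tot + 1, w, true, false) := by
            simp [pvBStep, hs, hp, hcs]
          rw [hstep, if_neg hs]
          obtain ⟨ih1, ih2, ih3⟩ := ih (sp + 1) (tot + 1) w true false
          refine ⟨?_, ?_, ?_⟩
          · rw [ih1]; simp [hp]; ring
          · rw [ih2]; simp [hcs]; ring
          · rw [ih3]
            have hpc : pvPunct.contains c = true := by simpa using hp
            have : (cl && !pvPunct.contains c) = false := by rw [hpc]; simp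
            rw [this]
        · have hstep : pvBStep (sp, tot, w, iw, cl) c
              = (sp, tot + 1, w, true, cl) := by
            simp [pvBStep, hs, hp, hcs]
          rw [hstep, if_neg hs]
          obtain ⟨ih1, ih2, ih3⟩ := ih sp (tot + 1) w true cl
          refine ⟨?_, ?_, ?_⟩
          · rw [ih1]; simp [hp]
          · rw [ih2]; simp [hcs]; ring
          · rw [ih3]
            have hpc : pvPunct.contains c = false := by simpa using hp
            have : (cl && !pvPunct.contains c) = cl := by rw [hpc]; simp
            rw [this]

theorem pvWords_eq (str : String) :
    (((PySem.Str.split₀ str).filter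
        (fun x => (x.toList.filter (fun y => (PySem.Set.ofList pvPunct).contains y)).length == 0)).length : Int)
      = pvStreamW str.toList false true := by
  have h1 : PySem.Str.split₀ str = (PySem.Chars.split₀ str.toList).map String.ofList := rfl
  rw [h1, List.filter_map, List.length_map]
  have h2 : ((fun x : String => (x.toList.filter (fun y => (PySem.Set.ofList pvPunct).contains y)).length == 0)
              ∘ String.ofList) = pvCleanW := by
    funext w
    simp only [Function.comp_apply, String.toList_ofList, pvOfList_punct,
      PySem.Set.contains_eq_listContains]
    exact pvClean_eq w
  rw [h2, ← List.countP_eq_length_filter]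
  have h4 : PySem.Chars.split₀ str.toList = PySem.Chars.split₀.go str.toList [] [] := rfl
  rw [h4, pvGo_clean str.toList [] []]
  simp [pvCleanW]

theorem pvAFold (cs : List Char) : ∀ (a b c : Int),
    cs.foldl pvAStep (PySem.Dict.mk [("special characters", a), ("words", b), ("total characters", c)])
      = PySem.Dict.mk [("special characters", a + (cs.countP (fun ch => pvPunct.contains ch) : Int)),
                       ("words", b),
                       ("total characters", c + (cs.countP (fun ch => decide (ch ≠ ' ')) : Int))] := by
  induction cs with
  | nil => intro a b c; simp
  | cons ch rest ih =>
      intro a b c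
      rw [List.foldl_cons]
      have hstep : pvAStep (PySem.Dict.mk [("special characters", a), ("words", b), ("total characters", c)]) ch
          = PySem.Dict.mk [("special characters", if ch ∈ pvPunct then a + 1 else a), ("words", b),
                           ("total characters", if ch ≠ ' ' then c + 1 else c)] := by
        by_cases hp : ch ∈ pvPunct
        · have hc : ch ≠ ' ' := by
            intro h; subst h; exact absurd hp (by decide)
          simp [pvAStep, pvOfList_punct, hp, hc, PySem.Dict.modify, PySem.Dict.insert,
                PySem.Dict.contains, PySem.Dict.getD, PySem.Dict.get?]
        · by_cases hc : ch = ' '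
          · subst hc
            have hnp : ((' ' : Char) ∈ pvPunct) = False := eq_false (by decide)
            simp [pvAStep, pvOfList_punct, hnp]
          · have hnp := eq_false hp
            simp [pvAStep, pvOfList_punct, hnp, hc, PySem.Dict.modify, PySem.Dict.insert,
                  PySem.Dict.contains, PySem.Dict.getD, PySem.Dict.get?]
      rw [hstep, ih]
      simp only [List.countP_cons]
      by_cases hp : ch ∈ pvPunct <;> by_cases hc : ch = ' '
      · exact absurd hp (by subst hc; decide)
      · simp [hp, hc]; constructor <;> ring
      · subst hc; simp; decide
      · simp [hp, hc]; ring

-- ===== VERDICT (by name: the statement is the Claim_ definition above) =====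
theorem analyse_string_spec : Claim_equal_analyse_string := by
  intro str _
  show analyse_string str = analyse_string_alt str
  simp only [analyse_string, analyse_string_alt]
  have hinit : PySem.Dict.ofList [("special characters", (0 : Int)), ("words", 0), ("total characters", 0)]
      = PySem.Dict.mk [("special characters", 0), ("words", 0), ("total characters", 0)] := by decide
  rw [hinit, pvAFold str.toList 0 0 0]
  obtain ⟨h1, h2, h3⟩ := pvBLoop_spec str.toList 0 0 0 false true
  rcases hfold : str.toList.foldl pvBStep (0, 0, 0, false, true) with ⟨sp, tot, w, iw, cl⟩
  rw [hfold] at h1 h2 h3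
  simp only at h1 h2 h3
  have hw := pvWords_eq str
  rw [hw]
  simp [PySem.Dict.insert, PySem.Dict.contains, h1, h2]
  cases iw <;> cases cl <;> simp_all
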